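-- pv_equiv track=rewrite | github.com/treangenlab/sampling-scheme-analysis | scripts/.ipynb_checkpoints/utils-checkpoint.py | de_bruijn_invBWT
-- ===== SOURCE A (Python) =====
-- def de_bruijn_invBWT(n, k):
--     """de Bruijn sequence for alphabet k
--     and subsequences of length n.
--     """
--     # Two kinds of alphabet input: an integer expands
--     # to a list of integers as the alphabet..
--     if isinstance(k, int):
--         alphabet = list(map(str, range(k)))
--     else:
--         # While any sort of list becomes used as it is
--         alphabet = k
--         k = len(k)
--
--     a = [0] * k * n
--     sequence = []
--
--     def db(t, p):
--         if t > n: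
--             if n % p == 0:
--                 sequence.extend(a[1 : p + 1])
--         else:
--             a[t] = a[t - p]
--             db(t + 1, p)
--             for j in range(a[t - p] + 1, k):
--                 a[t] = j
--                 db(t + 1, t)
--
--     db(1, 1)
--     return "".join(alphabet[i] for i in sequence)
-- ===== SOURCE B (Python) =====
-- def de_bruijn_invBWT(n, k):
--     """de Bruijn sequence for alphabet k
--     and subsequences of length n.
--
--     Iterative version: the recursive necklace generator is replaced by an
--     explicit work stack of frames (defunctionalized recursion), so no
--     nested function / recursion depth is needed.
--     """
--     if isinstance(k, int):
--         alphabet = [str(d) for d in range(k)]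
--     else:
--         alphabet = k
--         k = len(k)
--
--     a = [0] * k * n
--     sequence = []
--
--     # Frames: ("call", t, p) is a pending db(t, p) invocation;
--     # ("loop", t, p, j) is the rest of db's for-loop, next value j.
--     stack = [("call", 1, 1)]
--     while stack:
--         frame = stack.pop()
--         if frame[0] == "call":
--             _, t, p = frame
--             if t > n:
--                 if n % p == 0:
--                     sequence.extend(a[1 : p + 1])
--             else:
--                 v = a[t - p]
--                 a[t] = v
--                 stack.append(("loop", t, p, v + 1))
--                 stack.append(("call", t + 1, p))
--         else:
--             _, t, p, j = frame
--             if j < k: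
--                 a[t] = j
--                 stack.append(("loop", t, p, j + 1))
--                 stack.append(("call", t + 1, t))
--     return "".join(alphabet[i] for i in sequence)
-- ===== Notes on version B (the rewrite author's own statement) =====
-- stated objective: alternative
-- what changed: The recursive nested necklace generator db(t,p) is defunctionalized into an explicit LIFO work stack of call/loop frames driven by a single while loop, removing recursion (and Python's recursion-depth limit) while producing the identical sequence.
import Mathlib
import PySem

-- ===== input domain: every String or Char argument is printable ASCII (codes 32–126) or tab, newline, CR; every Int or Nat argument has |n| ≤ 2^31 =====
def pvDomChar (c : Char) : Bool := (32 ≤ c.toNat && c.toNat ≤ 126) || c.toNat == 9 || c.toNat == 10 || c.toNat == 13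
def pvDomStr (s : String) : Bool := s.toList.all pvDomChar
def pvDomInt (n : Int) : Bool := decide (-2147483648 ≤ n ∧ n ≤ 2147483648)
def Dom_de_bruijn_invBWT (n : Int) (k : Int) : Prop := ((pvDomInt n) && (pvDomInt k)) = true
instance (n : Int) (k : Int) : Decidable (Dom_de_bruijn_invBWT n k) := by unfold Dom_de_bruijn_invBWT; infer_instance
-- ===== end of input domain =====

-- B replaces A's recursive necklace generator by an explicit stack machine (defunctionalized
-- recursion); same output, no recursion.  Both Pythons mutate only their own locals.

-- ===== PORT A =====

-- a[t] = v ; exact for 0 ≤ t < len(a): every reachable write inside Pre_ is in range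
-- (Python raises IndexError out of range, which Pre_ excludes; t ≥ 1 always, so no negative wrap).
def pvSetI (a : List Int) (t v : Int) : List Int := a.set t.toNat v

-- the recursive db(t, p), state = (a, sequence); fuel only bounds the recursion depth
-- (the top call passes n.toNat, exactly the depth db needs, so fuel never runs out).
def dbA (n k : Int) (fuel : Nat) (t p : Int) (s : List Int × List Int) :
    List Int × List Int :=
  if t > n then
    if PySem.Int.mod n p = 0 then (s.1, s.2 ++ PySem.List.slice s.1 (some 1) (some (p + 1))) else s
  else
    match fuel with
    | 0 => s
    | f + 1 =>
      (PySem.List.pyRange ((PySem.List.pyGet? s.1 (t - p)).getD 0 + 1) k).foldl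
        (fun s2 j => dbA n k f (t + 1) t (pvSetI s2.1 t j, s2.2))
        (dbA n k f (t + 1) p (pvSetI s.1 t ((PySem.List.pyGet? s.1 (t - p)).getD 0), s.2))

def de_bruijn_invBWT (n : Int) (k : Int) : String :=
  let alphabet := (PySem.List.pyRange 0 k).map PySem.Int.toStr
  let a := List.replicate (k.toNat * n.toNat) (0 : Int)
  let s := dbA n k n.toNat 1 1 (a, [])
  PySem.Str.join "" (s.2.map fun i => (PySem.List.pyGet? alphabet i).getD "")

-- ===== PORT B =====

-- a stack frame of B: a pending db call, or the remainder of db's for-loop (next value j)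
inductive PvFrame where
  | call (t p : Int)
  | loop (t p j : Int)
deriving DecidableEq, Repr

-- termination measure of one stack frame (proof device only, not part of B's algorithm)
def pvMu (n k : Int) : PvFrame → Nat
  | .call t _ => (2 * k.toNat + 2) ^ ((n + 1 - t).toNat + 1)
  | .loop t _ j => (k - j).toNat * ((2 * k.toNat + 2) ^ ((n + 1 - t).toNat) + (2 * k.toNat + 2))

-- measure arithmetic for runB's termination (cited by decreasing_by); the pvCore… lemmas
-- state the linear skeletons over plain naturals so the proof terms stay small
lemma pvKey1 (K e m : Nat) (hm : m ≤ K) :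
    (2 * K + 2) ^ (e + 1) + m * ((2 * K + 2) ^ (e + 1) + (2 * K + 2)) + 1
      ≤ (2 * K + 2) ^ (e + 1 + 1) := by
  have hb : (2 * K + 2) ≤ (2 * K + 2) ^ (e + 1) := Nat.le_self_pow (Nat.succ_ne_zero e) _
  rw [pow_succ (2 * K + 2) (e + 1)]
  generalize (2 * K + 2) ^ (e + 1) = X at hb ⊢
  have h1 : m * (X + (2 * K + 2)) ≤ 2 * (K * X) :=
    calc m * (X + (2 * K + 2)) ≤ K * (X + X) := Nat.mul_le_mul hm (Nat.add_le_add_left hb X)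
      _ = 2 * (K * X) := by ring
  have h2 : X * (2 * K + 2) = 2 * (K * X) + 2 * X := by ring
  have h3 : 1 ≤ X := le_trans (le_trans one_le_two (Nat.le_add_left 2 (2 * K))) hb
  calc X + m * (X + (2 * K + 2)) + 1
      ≤ X + 2 * (K * X) + 1 := Nat.add_le_add_right (Nat.add_le_add_left h1 X) 1
    _ ≤ X + 2 * (K * X) + X := Nat.add_le_add_left h3 _
    _ = X * (2 * K + 2) := by rw [h2]; ring

lemma pvKey2 (K : Nat) (n t : Int) :
    (2 * K + 2) ^ ((n + 1 - (t + 1)).toNat + 1) < (2 * K + 2) ^ ((n + 1 - t).toNat) + (2 * K + 2) := by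
  have e1 : n + 1 - (t + 1) = n + 1 - t - 1 := sub_add_eq_sub_sub _ _ _
  by_cases h : n + 1 - t ≤ 0
  · have h2 : n + 1 - (t + 1) ≤ 0 := by
      rw [e1]; exact le_trans (sub_le_self _ zero_le_one) h
    rw [Int.toNat_of_nonpos h, Int.toNat_of_nonpos h2, pow_one, pow_zero]
    exact Nat.lt_one_add_iff.mpr le_rfl
  · have h1 : (1 : Int) ≤ n + 1 - t := by
      rw [← zero_add (1 : Int)]; exact Int.add_one_le_iff.mpr (lt_of_not_ge h)
    have h0 : (0 : Int) ≤ n + 1 - (t + 1) := by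
      rw [e1]; exact Int.sub_nonneg.mpr h1
    rw [show n + 1 - t = (n + 1 - (t + 1)) + 1 by rw [e1, sub_add_cancel],
      Int.toNat_add h0 zero_le_one]
    exact Nat.lt_add_of_pos_right (Nat.succ_le_succ (Nat.zero_le _))

lemma pvCoreDrop (M S L : Nat) : 2 * S + L < 2 * (M + S) + (L + 1) := by omega

lemma pvCore2 (Y P X S L : Nat) (h : Y + P + 1 ≤ X) :
    2 * (Y + (P + S)) + (L + 1 + 1) < 2 * (X + S) + (L + 1) := by omega

lemma pvCore3 (C P X S L : Nat) (h : C < X) :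
    2 * (C + (P + S)) + (L + 1 + 1) < 2 * ((P + X) + S) + (L + 1) := by omega

-- the four termination facts of the stack loop, one per branch (cited by decreasing_by)
lemma pvDec1 (n k t p : Int) (rest : List PvFrame) :
    2 * (List.map (pvMu n k) rest).sum + rest.length
      < 2 * (List.map (pvMu n k) (PvFrame.call t p :: rest)).sum
          + (PvFrame.call t p :: rest).length := by
  simp only [List.map_cons, List.sum_cons, List.length_cons]
  exact pvCoreDrop _ _ _

lemma pvDec2 (n k t p v : Int) (rest : List PvFrame) (ht : ¬t > n) :
    2 * (List.map (pvMu n k)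
          (PvFrame.call (t + 1) p :: PvFrame.loop t p (max (v + 1) 0) :: rest)).sum
        + (PvFrame.call (t + 1) p :: PvFrame.loop t p (max (v + 1) 0) :: rest).length
      < 2 * (List.map (pvMu n k) (PvFrame.call t p :: rest)).sum
          + (PvFrame.call t p :: rest).length := by
  simp only [List.map_cons, List.sum_cons, List.length_cons, pvMu]
  have h0 : (0 : Int) ≤ n - t := Int.sub_nonneg.mpr (le_of_not_gt ht)
  have he : (n + 1 - t).toNat = (n - t).toNat + 1 := by
    rw [add_sub_right_comm n 1 t, Int.toNat_add h0 zero_le_one]; rfl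
  have he2 : (n + 1 - (t + 1)).toNat = (n - t).toNat := by
    rw [add_sub_add_right_eq_sub n t 1]
  rw [he, he2]
  exact pvCore2 _ _ _ _ _
    (pvKey1 k.toNat ((n - t).toNat) ((k - max (v + 1) 0).toNat)
      (Int.toNat_le_toNat (sub_le_self _ (le_max_right _ _))))

lemma pvDec3 (n k t p j : Int) (rest : List PvFrame) (hjk : j < k) :
    2 * (List.map (pvMu n k)
          (PvFrame.call (t + 1) t :: PvFrame.loop t p (j + 1) :: rest)).sum
        + (PvFrame.call (t + 1) t :: PvFrame.loop t p (j + 1) :: rest).length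
      < 2 * (List.map (pvMu n k) (PvFrame.loop t p j :: rest)).sum
          + (PvFrame.loop t p j :: rest).length := by
  simp only [List.map_cons, List.sum_cons, List.length_cons, pvMu]
  have h0 : (0 : Int) ≤ k - (j + 1) := Int.sub_nonneg.mpr (Int.add_one_le_iff.mpr hjk)
  have hkj : (k - j).toNat = (k - (j + 1)).toNat + 1 := by
    rw [show k - j = (k - (j + 1)) + 1 by rw [sub_add_eq_sub_sub, sub_add_cancel],
      Int.toNat_add h0 zero_le_one]; rfl
  rw [hkj, Nat.add_mul, one_mul]
  exact pvCore3 _ _ _ _ _ (pvKey2 k.toNat n t)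

lemma pvDec4 (n k t p j : Int) (rest : List PvFrame) :
    2 * (List.map (pvMu n k) rest).sum + rest.length
      < 2 * (List.map (pvMu n k) (PvFrame.loop t p j :: rest)).sum
          + (PvFrame.loop t p j :: rest).length := by
  simp only [List.map_cons, List.sum_cons, List.length_cons]
  exact pvCoreDrop _ _ _

-- the while loop over the work stack.  'max (… + 1) 0' is a totality guard only: in every
-- reachable state the entries of a are ≥ 0 (proved below as pvNN), so the max is the identity.
def runB (n k : Int) (st : List PvFrame) (s : List Int × List Int) : List Int × List Int :=
  match st with
  | [] => s
  | .call t p :: rest =>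
    if t > n then
      runB n k rest
        (if PySem.Int.mod n p = 0 then (s.1, s.2 ++ PySem.List.slice s.1 (some 1) (some (p + 1))) else s)
    else
      runB n k
        (.call (t + 1) p :: .loop t p (max ((PySem.List.pyGet? s.1 (t - p)).getD 0 + 1) 0) :: rest)
        (pvSetI s.1 t ((PySem.List.pyGet? s.1 (t - p)).getD 0), s.2)
  | .loop t p j :: rest =>
    if j < k then
      runB n k (.call (t + 1) t :: .loop t p (j + 1) :: rest) (pvSetI s.1 t j, s.2)
    else
      runB n k rest s
termination_by 2 * (st.map (pvMu n k)).sum + st.length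
decreasing_by
  · exact pvDec1 n k t p rest
  · exact pvDec2 n k t p _ rest (by assumption)
  · exact pvDec3 n k t p j rest (by assumption)
  · exact pvDec4 n k t p j rest

def de_bruijn_invBWT_alt (n : Int) (k : Int) : String :=
  let alphabet := (PySem.List.pyRange 0 k).map PySem.Int.toStr
  let a := List.replicate (k.toNat * n.toNat) (0 : Int)
  let s := runB n k [.call 1 1] (a, [])
  PySem.Str.join "" (s.2.map fun i => (PySem.List.pyGet? alphabet i).getD "")

-- ===== PRECONDITION & SPEC =====

-- A raises IndexError exactly when n ≥ 1 and k ≤ 1: then a = [0]*k*n is too short for the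
-- write a[t] (t = 1..n).  B's Python raises there too, so no returned value of A is excluded.
def Pre_de_bruijn_invBWT (n : Int) (k : Int) : Prop := n < 1 ∨ 2 ≤ k
instance (n : Int) (k : Int) : Decidable (Pre_de_bruijn_invBWT n k) := by unfold Pre_de_bruijn_invBWT; infer_instance
def pvWitness_de_bruijn_invBWT : Int × Int := (2, 2)

def Spec_de_bruijn_invBWT (n : Int) (k : Int) (out : String) : Prop := out = de_bruijn_invBWT_alt n k
instance (n : Int) (k : Int) (out : String) : Decidable (Spec_de_bruijn_invBWT n k out) := by unfold Spec_de_bruijn_invBWT; infer_instance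

-- ===== CLAIM (what is proved, stated in full; the proofs are below) =====
def Claim_equal_de_bruijn_invBWT : Prop := ∀ (n : Int) (k : Int), Dom_de_bruijn_invBWT n k → Pre_de_bruijn_invBWT n k → Spec_de_bruijn_invBWT n k (de_bruijn_invBWT n k)

-- ===== LEMMAS AND PROOFS =====

-- denotation of one frame: what processing it (and everything it spawns) does to the state
def pvDenote (n k : Int) : PvFrame → List Int × List Int → List Int × List Int
  | .call t p, s => dbA n k ((n + 1 - t).toNat) t p s
  | .loop t _ j, s =>
      (PySem.List.pyRange j k).foldl
        (fun s2 jj => dbA n k ((n - t).toNat) (t + 1) t (pvSetI s2.1 t jj, s2.2)) s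

-- invariant: every entry of a is non-negative
def pvNN (a : List Int) : Prop := ∀ x ∈ a, 0 ≤ x

lemma pvNN_set {a : List Int} (t v : Int) (ha : pvNN a) (hv : 0 ≤ v) : pvNN (pvSetI a t v) := by
  intro x hx
  rcases List.mem_or_eq_of_mem_set hx with h | h
  · exact ha x h
  · omega

lemma pvNN_getD {a : List Int} (i : Int) (ha : pvNN a) : 0 ≤ (PySem.List.pyGet? a i).getD 0 := by
  cases h : PySem.List.pyGet? a i with
  | none => simp
  | some x => simpa using ha x (PySem.List.mem_of_pyGet?_eq_some _ h)

lemma pvNN_dbA (n k : Int) : ∀ (f : Nat) (t p : Int) (s : List Int × List Int),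
    pvNN s.1 → pvNN (dbA n k f t p s).1 := by
  intro f
  induction f with
  | zero =>
    intro t p s hs
    rw [dbA]
    by_cases ht : t > n
    · rw [if_pos ht]; split <;> simpa
    · rw [if_neg ht]; simpa
  | succ f ih =>
    intro t p s hs
    rw [dbA]
    by_cases ht : t > n
    · rw [if_pos ht]; split <;> simpa
    · rw [if_neg ht]
      show pvNN ((PySem.List.pyRange ((PySem.List.pyGet? s.1 (t - p)).getD 0 + 1) k).foldl
        (fun s2 j => dbA n k f (t + 1) t (pvSetI s2.1 t j, s2.2))
        (dbA n k f (t + 1) p (pvSetI s.1 t ((PySem.List.pyGet? s.1 (t - p)).getD 0), s.2))).1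
      have hv : 0 ≤ (PySem.List.pyGet? s.1 (t - p)).getD 0 := pvNN_getD _ hs
      have hs1 : pvNN (dbA n k f (t + 1) p
          (pvSetI s.1 t ((PySem.List.pyGet? s.1 (t - p)).getD 0), s.2)).1 :=
        ih _ _ _ (pvNN_set _ _ hs hv)
      have hmem : ∀ j ∈ PySem.List.pyRange ((PySem.List.pyGet? s.1 (t - p)).getD 0 + 1) k,
          (0 : Int) ≤ j := by
        intro j hj
        rw [PySem.List.mem_pyRange_one] at hj
        omega
      revert hs1 hmem
      generalize PySem.List.pyRange ((PySem.List.pyGet? s.1 (t - p)).getD 0 + 1) k = l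
      generalize dbA n k f (t + 1) p
          (pvSetI s.1 t ((PySem.List.pyGet? s.1 (t - p)).getD 0), s.2) = s1
      intro hs1 hmem
      induction l generalizing s1 with
      | nil => simpa
      | cons j l ihl =>
        simp only [List.foldl_cons]
        exact ihl _ (ih _ _ _ (pvNN_set _ _ hs1 (hmem j List.mem_cons_self)))
          (fun x hx => hmem x (List.mem_cons_of_mem _ hx))

-- simulation: popping one frame equals applying its denotation to the state
lemma pvSim (n k : Int) : ∀ (m : Nat) (fr : PvFrame) (st : List PvFrame) (s : List Int × List Int),
    pvMu n k fr ≤ m → pvNN s.1 → (∀ t p j, fr = PvFrame.loop t p j → 0 ≤ j) →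
    runB n k (fr :: st) s = runB n k st (pvDenote n k fr s) := by
  intro m
  induction m with
  | zero =>
    intro fr st s hm hs hfr
    cases fr with
    | call t p =>
      exfalso
      have : 1 ≤ (2 * k.toNat + 2) ^ ((n + 1 - t).toNat + 1) := Nat.one_le_pow _ _ (by omega)
      simp only [pvMu] at hm; linarith
    | loop t p j =>
      have hjk : ¬ j < k := by
        intro h
        have h1 : 1 ≤ (k - j).toNat := by omega
        have h2 : 1 ≤ (2 * k.toNat + 2) ^ ((n + 1 - t).toNat) := Nat.one_le_pow _ _ (by omega)
        simp only [pvMu] at hm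
        nlinarith
      rw [runB, if_neg hjk]
      simp [pvDenote, PySem.List.pyRange_one_eq_nil (by omega : k ≤ j)]
  | succ m ih =>
    intro fr st s hm hs hfr
    cases fr with
    | call t p =>
      by_cases ht : t > n
      · rw [runB, if_pos ht]
        have hd : pvDenote n k (.call t p) s =
            (if PySem.Int.mod n p = 0 then (s.1, s.2 ++ PySem.List.slice s.1 (some 1) (some (p + 1))) else s) := by
          rw [pvDenote, dbA.eq_def, if_pos ht]
        rw [hd]
      · have he : (n + 1 - t).toNat = (n - t).toNat + 1 := by omega
        have he2 : (n + 1 - (t + 1)).toNat = (n - t).toNat := by omega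
        rw [runB, if_neg ht]
        have hv : 0 ≤ (PySem.List.pyGet? s.1 (t - p)).getD 0 := pvNN_getD _ hs
        rw [max_eq_left (by omega : (0:Int) ≤ (PySem.List.pyGet? s.1 (t - p)).getD 0 + 1)]
        have hs' : pvNN (pvSetI s.1 t ((PySem.List.pyGet? s.1 (t - p)).getD 0)) :=
          pvNN_set _ _ hs hv
        have hmcall : pvMu n k (.call (t + 1) p) ≤ m := by
          simp only [pvMu, he] at hm
          simp only [pvMu, he2]
          have h1 : 1 ≤ (2 * k.toNat + 2) ^ ((n - t).toNat + 1) := Nat.one_le_pow _ _ (by omega)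
          have hpow : (2 * k.toNat + 2) ^ ((n - t).toNat + 1 + 1)
              = (2 * k.toNat + 2) ^ ((n - t).toNat + 1) * (2 * k.toNat + 2) := pow_succ _ _
          nlinarith
        have hmloop : pvMu n k (.loop t p ((PySem.List.pyGet? s.1 (t - p)).getD 0 + 1)) ≤ m := by
          simp only [pvMu, he] at hm ⊢
          have := pvKey1 k.toNat ((n - t).toNat)
            ((k - ((PySem.List.pyGet? s.1 (t - p)).getD 0 + 1)).toNat) (by omega)
          have h1 : 1 ≤ (2 * k.toNat + 2) ^ ((n - t).toNat + 1) := Nat.one_le_pow _ _ (by omega)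
          linarith
        rw [ih _ _ _ hmcall hs' (by intro _ _ _ h; cases h)]
        have hNN2 : pvNN (pvDenote n k (.call (t + 1) p)
            (pvSetI s.1 t ((PySem.List.pyGet? s.1 (t - p)).getD 0), s.2)).1 := by
          rw [pvDenote]; exact pvNN_dbA n k _ _ _ _ hs'
        rw [ih _ _ _ hmloop hNN2 (by intro _ _ _ h; cases h; omega)]
        congr 1
        rw [show pvDenote n k (PvFrame.call (t + 1) p)
              (pvSetI s.1 t ((PySem.List.pyGet? s.1 (t - p)).getD 0), s.2)
            = dbA n k ((n - t).toNat) (t + 1) p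
              (pvSetI s.1 t ((PySem.List.pyGet? s.1 (t - p)).getD 0), s.2) from by
          rw [pvDenote, he2]]
        conv_rhs => rw [pvDenote, he, dbA.eq_def, if_neg ht]
        rfl
    | loop t p j =>
      have hj : 0 ≤ j := hfr t p j rfl
      by_cases hjk : j < k
      · rw [runB, if_pos hjk]
        have hs' : pvNN (pvSetI s.1 t j) := pvNN_set _ _ hs hj
        have he2 : (n + 1 - (t + 1)).toNat = (n - t).toNat := by omega
        have hkj : (k - j).toNat = (k - (j + 1)).toNat + 1 := by omega
        have hmcall : pvMu n k (.call (t + 1) t) ≤ m := by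
          simp only [pvMu] at hm ⊢
          have := pvKey2 k.toNat n t
          rw [hkj] at hm
          have h3 : ((2 * k.toNat + 2) ^ (n + 1 - t).toNat + (2 * k.toNat + 2))
              ≤ ((k - (j + 1)).toNat + 1) * ((2 * k.toNat + 2) ^ (n + 1 - t).toNat + (2 * k.toNat + 2)) :=
            Nat.le_mul_of_pos_left _ (by omega)
          linarith
        have hmloop : pvMu n k (.loop t p (j + 1)) ≤ m := by
          simp only [pvMu] at hm ⊢
          have h2 : 1 ≤ (2 * k.toNat + 2) ^ ((n + 1 - t).toNat) := Nat.one_le_pow _ _ (by omega)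
          rw [hkj] at hm
          linarith
        rw [ih _ _ _ hmcall hs' (by intro _ _ _ h; cases h)]
        have hNN2 : pvNN (pvDenote n k (.call (t + 1) t) (pvSetI s.1 t j, s.2)).1 := by
          rw [pvDenote]; exact pvNN_dbA n k _ _ _ _ hs'
        rw [ih _ _ _ hmloop hNN2 (by intro _ _ _ h; cases h; omega)]
        congr 1
        rw [show pvDenote n k (PvFrame.call (t + 1) t) (pvSetI s.1 t j, s.2)
            = dbA n k ((n - t).toNat) (t + 1) t (pvSetI s.1 t j, s.2) from by
          rw [pvDenote, he2]]
        conv_rhs => rw [pvDenote, PySem.List.pyRange_one_cons hjk, List.foldl_cons]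
        rfl
      · rw [runB, if_neg hjk]
        simp [pvDenote, PySem.List.pyRange_one_eq_nil (by omega : k ≤ j)]

-- ===== VERDICT (by name: the statement is the Claim_ definition above) =====
theorem de_bruijn_invBWT_spec : Claim_equal_de_bruijn_invBWT := by
  intro n k _ _
  unfold Spec_de_bruijn_invBWT de_bruijn_invBWT de_bruijn_invBWT_alt
  have hNN : pvNN (List.replicate (k.toNat * n.toNat) (0 : Int)) := by
    intro x hx
    have := List.eq_of_mem_replicate hx
    omega
  have hrun : runB n k [PvFrame.call 1 1] (List.replicate (k.toNat * n.toNat) (0 : Int), [])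
      = dbA n k n.toNat 1 1 (List.replicate (k.toNat * n.toNat) (0 : Int), []) := by
    rw [pvSim n k (pvMu n k (.call 1 1)) (.call 1 1) [] _ le_rfl hNN
      (by intro _ _ _ h; cases h)]
    rw [runB, pvDenote]
    have h1 : ((n + 1 - 1 : Int)).toNat = n.toNat := by omega
    rw [h1]
  show PySem.Str.join "" ((dbA n k n.toNat 1 1 (List.replicate (k.toNat * n.toNat) (0 : Int), [])).2.map
      fun i => (PySem.List.pyGet? ((PySem.List.pyRange 0 k).map PySem.Int.toStr) i).getD "")
    = PySem.Str.join "" ((runB n k [PvFrame.call 1 1] (List.replicate (k.toNat * n.toNat) (0 : Int), [])).2.map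
      fun i => (PySem.List.pyGet? ((PySem.List.pyRange 0 k).map PySem.Int.toStr) i).getD "")
  rw [hrun]
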